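-- pv_equiv track=rewrite | github.com/maximilianogomez/Progra1 | Practica 7/7.11.py | minimo_matriz2
-- ===== SOURCE A (Python) =====
-- def minimo_matriz2(matriz, f = 0,minimo= 9999):
--     if f == len(matriz)-1:
--         return minimo
--     else:
--         menor_fila = min(matriz[f])
--         if menor_fila < minimo:
--             return minimo_matriz2(matriz, f + 1, menor_fila)
--         else:
--             return minimo_matriz2(matriz, f + 1, minimo)
-- ===== SOURCE B (Python) =====
-- def minimo_matriz2(matriz, f=0, minimo=9999):
--     mins = []
--     g = len(matriz) - 1
--     while g != f:
--         g -= 1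
--         mins.append(min(matriz[g]))
--     return min([minimo] + mins)
-- ===== Notes on version B (the rewrite author's own statement) =====
-- stated objective: alternative
-- what changed: Replaced A's tail recursion, which threads the running minimum through two separate recursive-call branches while walking the rows forward, by a backward while-loop that collects every visited row's minimum into a list and reduces [minimo] + that list with one final min call (min is order-insensitive over the same set of rows).
import Mathlib
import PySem

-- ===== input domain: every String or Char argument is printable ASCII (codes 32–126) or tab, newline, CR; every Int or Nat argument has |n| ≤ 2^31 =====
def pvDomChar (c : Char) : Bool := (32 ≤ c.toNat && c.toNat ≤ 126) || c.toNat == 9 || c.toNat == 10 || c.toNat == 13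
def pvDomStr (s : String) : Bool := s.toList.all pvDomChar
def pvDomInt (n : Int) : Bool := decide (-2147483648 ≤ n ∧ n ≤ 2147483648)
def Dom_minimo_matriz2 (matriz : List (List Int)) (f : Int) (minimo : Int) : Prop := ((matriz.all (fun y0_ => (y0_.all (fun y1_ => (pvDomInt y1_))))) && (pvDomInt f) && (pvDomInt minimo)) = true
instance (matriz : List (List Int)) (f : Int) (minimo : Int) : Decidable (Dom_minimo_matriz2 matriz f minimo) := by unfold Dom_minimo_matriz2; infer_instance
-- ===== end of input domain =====

-- ===== PORT A =====
-- B replaces A's accumulator-threading tail recursion by a backward loop that collects the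
-- per-row minima into a list and reduces [minimo] + it with one final min (min is order-
-- insensitive over the same rows); same return value on Pre_.
-- Fuel ((len-1)-f).toNat only makes A's recursion total: it is exactly the number of
-- steps A takes when f ≤ len-1; Pre_ excludes f > len-1 (where Python A raises).
def minimo_matriz2_go (matriz : List (List Int)) (fuel : Nat) (f : Int) (minimo : Int) : Int :=
  match fuel with
  | 0 => minimo
  | Nat.succ fuel' =>
    if f = (matriz.length : Int) - 1 then minimo
    else
      let menor_fila := (PySem.List.min? ((PySem.List.pyGet? matriz f).getD []) (fun x => x)).getD 0
      if menor_fila < minimo then minimo_matriz2_go matriz fuel' (f + 1) menor_fila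
      else minimo_matriz2_go matriz fuel' (f + 1) minimo

def minimo_matriz2 (matriz : List (List Int)) (f : Int) (minimo : Int) : Int :=
  minimo_matriz2_go matriz (((matriz.length : Int) - 1 - f).toNat) f minimo

-- ===== PORT B =====
-- mins = []; g = len(matriz) - 1; while g != f: g -= 1; mins.append(min(matriz[g]))
-- return min([minimo] + mins)
-- (fuel (g0 - f).toNat only makes the while loop total: under Pre_ it is its exact trip count)
def minimo_matriz2_alt_go (m : List (List Int)) (steps : Nat) (f : Int) (g : Int) (mins : List Int) : List Int :=
  match steps with
  | 0 => mins
  | rest + 1 =>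
    if g = f then mins
    else
      minimo_matriz2_alt_go m rest f (g - 1)
        (mins ++ [(PySem.List.min? (PySem.List.pyGetD m (g - 1) []) (fun y => y)).getD 0])

def minimo_matriz2_alt (matriz : List (List Int)) (f : Int) (minimo : Int) : Int :=
  let g := (matriz.length : Int) - 1
  (PySem.List.min? (minimo :: minimo_matriz2_alt_go matriz ((g - f).toNat) f g []) (fun x => x)).getD 0

-- ===== PRECONDITION & SPEC =====
-- Pre_ excludes exactly the inputs where Python A raises: f past the last row
-- (infinite recursion), f below -len (IndexError), or a visited row with no
-- elements (ValueError on min).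
def Pre_minimo_matriz2 (matriz : List (List Int)) (f : Int) (minimo : Int) : Prop :=
  (f = (matriz.length : Int) - 1 ∨ (-(matriz.length : Int) ≤ f ∧ f ≤ (matriz.length : Int) - 1)) ∧
  ∀ i ∈ PySem.List.pyRange f ((matriz.length : Int) - 1) 1,
    ((PySem.List.pyGet? matriz i).getD []) ≠ []
instance (matriz : List (List Int)) (f : Int) (minimo : Int) : Decidable (Pre_minimo_matriz2 matriz f minimo) := by unfold Pre_minimo_matriz2; infer_instance

def pvWitness_minimo_matriz2 : List (List Int) × Int × Int := ([[1, 2], [3]], 0, 9999)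

def Spec_minimo_matriz2 (matriz : List (List Int)) (f : Int) (minimo : Int) (out : Int) : Prop := out = minimo_matriz2_alt matriz f minimo
instance (matriz : List (List Int)) (f : Int) (minimo : Int) (out : Int) : Decidable (Spec_minimo_matriz2 matriz f minimo out) := by unfold Spec_minimo_matriz2; infer_instance

-- ===== CLAIM (what is proved, stated in full; the proofs are below) =====
def Claim_equal_minimo_matriz2 : Prop := ∀ (matriz : List (List Int)) (f : Int) (minimo : Int), Dom_minimo_matriz2 matriz f minimo → Pre_minimo_matriz2 matriz f minimo → Spec_minimo_matriz2 matriz f minimo (minimo_matriz2 matriz f minimo)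

-- ===== LEMMAS AND PROOFS =====

-- min of a row, as both ports compute it
def pvRowMin (fila : List Int) : Int := (PySem.List.min? fila (fun x => x)).getD 0

-- the rows A's recursion visits, in order
def pvVisited (matriz : List (List Int)) (f : Int) (n : Nat) : List (List Int) :=
  (List.range n).map (fun (k : Nat) => (PySem.List.pyGet? matriz (f + (k : Int))).getD [])

lemma pvVisited_succ (matriz : List (List Int)) (f : Int) (n : Nat) :
    pvVisited matriz f (n + 1) =
      ((PySem.List.pyGet? matriz f).getD []) :: pvVisited matriz (f + 1) n := by
  unfold pvVisited
  rw [List.range_succ_eq_map, List.map_cons, List.map_map]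
  simp only [Nat.cast_zero, add_zero]
  congr 1
  apply List.map_congr_left
  intro k _
  simp only [Function.comp_apply, Nat.succ_eq_add_one]
  congr 2
  push_cast
  ring

lemma pv_go_eq_foldl (matriz : List (List Int)) :
    ∀ (n : Nat) (f minimo : Int), f + (n : Int) = (matriz.length : Int) - 1 →
      minimo_matriz2_go matriz n f minimo =
        (pvVisited matriz f n).foldl (fun a r => min (pvRowMin r) a) minimo := by
  intro n
  induction n with
  | zero => intro f minimo _; rfl
  | succ n ih =>
    intro f minimo h
    have hne : f ≠ (matriz.length : Int) - 1 := by omega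
    have hnext : (f + 1) + (n : Int) = (matriz.length : Int) - 1 := by push_cast at h ⊢; omega
    rw [minimo_matriz2_go, pvVisited_succ]
    simp only [hne, if_false, List.foldl_cons]
    rw [← apply_ite (minimo_matriz2_go matriz n (f + 1)), ih _ _ hnext]
    congr 1
    show _ = min (pvRowMin ((PySem.List.pyGet? matriz f).getD [])) minimo
    rw [pvRowMin, min_def]
    split_ifs <;> omega

-- pvVisited grown at the far end
lemma pvVisited_snoc (matriz : List (List Int)) (f : Int) (n : Nat) :
    pvVisited matriz f (n + 1) =
      pvVisited matriz f n ++ [(PySem.List.pyGet? matriz (f + (n : Int))).getD []] := by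
  unfold pvVisited
  rw [List.range_succ, List.map_append]
  simp

-- B's backward loop collects the row minima of the rows A visits, in reverse order
lemma pv_alt_go_eq_reverse_map (matriz : List (List Int)) (f : Int) :
    ∀ (n : Nat) (mins : List Int),
      minimo_matriz2_alt_go matriz n f (f + (n : Int)) mins =
        mins ++ ((pvVisited matriz f n).map pvRowMin).reverse := by
  intro n
  induction n with
  | zero => intro mins; simp [minimo_matriz2_alt_go, pvVisited]
  | succ n ih =>
    intro mins
    have hne : f + ((n : Int) + 1) ≠ f := by omega
    rw [minimo_matriz2_alt_go]
    push_cast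
    rw [if_neg hne]
    have hg : f + ((n : Int) + 1) - 1 = f + (n : Int) := by ring
    rw [hg, ih, pvVisited_snoc, List.map_append, List.reverse_append]
    simp [pvRowMin, PySem.List.pyGetD]

-- pulling one element through a min-fold
lemma pv_foldl_min_pull (l : List Int) : ∀ (a x : Int),
    min (l.foldl min a) x = l.foldl min (min a x) := by
  induction l with
  | nil => intro a x; rfl
  | cons b l ih =>
    intro a x
    rw [List.foldl_cons, List.foldl_cons, ih]
    congr 1
    rw [min_assoc, min_comm b x, ← min_assoc]

-- a min-fold ignores the order of the list
lemma pv_foldl_min_reverse (l : List Int) : ∀ (a : Int),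
    l.reverse.foldl min a = l.foldl min a := by
  induction l with
  | nil => intro a; rfl
  | cons x l ih =>
    intro a
    rw [List.reverse_cons, List.foldl_append, ih, List.foldl_cons]
    simp only [List.foldl_cons, List.foldl_nil]
    rw [pv_foldl_min_pull, min_comm a x]

-- A's accumulator fold is the min-fold of the mapped row minima
lemma pv_foldl_min_comm (l : List (List Int)) (a : Int) :
    l.foldl (fun a r => min (pvRowMin r) a) a = (l.map pvRowMin).foldl min a := by
  rw [List.foldl_map]
  have : (fun (a : Int) (r : List Int) => min (pvRowMin r) a)
       = (fun (a : Int) (r : List Int) => min a (pvRowMin r)) := by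
    funext a r; exact min_comm _ _
  rw [this]

-- ===== VERDICT (by name: the statement is the Claim_ definition above) =====
theorem minimo_matriz2_spec : Claim_equal_minimo_matriz2 := by
  intro matriz f minimo _ hpre
  unfold Spec_minimo_matriz2 minimo_matriz2
  obtain ⟨hrange, _⟩ := hpre
  have hfuel : f + ((((matriz.length : Int) - 1 - f).toNat : Nat) : Int)
      = (matriz.length : Int) - 1 := by omega
  rw [pv_go_eq_foldl matriz _ f minimo hfuel]
  have hgo := pv_alt_go_eq_reverse_map matriz f (((matriz.length : Int) - 1 - f).toNat) []
  rw [hfuel] at hgo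
  show _ = (PySem.List.min?
      (minimo :: minimo_matriz2_alt_go matriz
        (((matriz.length : Int) - 1) - f).toNat f ((matriz.length : Int) - 1) [])
      (fun x => x)).getD 0
  rw [hgo, List.nil_append, PySem.List.min?_id_cons]
  simp only [Option.getD_some]
  rw [pv_foldl_min_reverse, pv_foldl_min_comm]
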